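-- pv_equiv track=rewrite | github.com/SmoothyMcCool/minty | webapp/backend/bundle/src/main/resources/scripts/split-markdown.py | find_parent_index
-- ===== SOURCE A (Python) =====
-- def find_parent_index(sections: list[dict], i: int) -> int | None:
--     current_level = sections[i]["level"]
--     if current_level == 0:
--         return None  # preamble has no parent
--     for j in range(i - 1, -1, -1):
--         if sections[j]["level"] < current_level:
--             return sections[j]["index"]
--     return None
-- ===== SOURCE B (Python) =====
-- def find_parent_index(sections: list[dict], i: int) -> int | None:
--     current_level = sections[i]["level"]
--     if current_level == 0:
--         return None  # preamble has no parent
--     parent = None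
--     for j in range(i):
--         lvl = sections[j].get("level")
--         if lvl is not None and lvl < current_level:
--             parent = sections[j].get("index")
--     return parent
-- ===== Notes on version B (the rewrite author's own statement) =====
-- stated objective: alternative
-- what changed: A's backward index scan with early return at the first lower-level section is replaced by a single forward pass over range(i) that keeps the last lower-level section's index in an accumulator, reading the dict keys defensively with .get; the last qualifying section in forward order is exactly the nearest preceding one.
import Mathlib
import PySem

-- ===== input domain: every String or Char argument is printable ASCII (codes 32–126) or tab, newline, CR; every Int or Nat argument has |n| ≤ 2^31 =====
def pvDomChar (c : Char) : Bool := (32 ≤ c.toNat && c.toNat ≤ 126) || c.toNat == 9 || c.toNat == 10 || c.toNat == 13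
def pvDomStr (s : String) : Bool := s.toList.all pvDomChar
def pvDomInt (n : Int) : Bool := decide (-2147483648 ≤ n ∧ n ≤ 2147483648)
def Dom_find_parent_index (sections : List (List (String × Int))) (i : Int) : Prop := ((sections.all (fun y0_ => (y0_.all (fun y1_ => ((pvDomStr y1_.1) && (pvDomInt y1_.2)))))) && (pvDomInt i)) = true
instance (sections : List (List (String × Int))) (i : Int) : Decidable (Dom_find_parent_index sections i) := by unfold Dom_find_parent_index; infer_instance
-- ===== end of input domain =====

-- B replaces A's backward index scan with early return by a single forward pass over
-- range(i) keeping the last lower-level section's index in an accumulator ('parent'),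
-- reading the keys defensively with dict.get (alternative decomposition, same values).

-- ===== PORT A =====
-- for j in range(i-1, -1, -1): early return sections[j]["index"] at the first lower level
def fpiLoopA (sections : List (List (String × Int))) (cl : Int) : List Int → Option Int
  | [] => none
  | j :: rest =>
    match PySem.List.pyGet? sections j with
    | none => none  -- IndexError (unreachable under Pre_)
    | some sec =>
      match (PySem.Dict.mk sec).get? "level" with
      | none => none  -- KeyError (outside Pre_)
      | some lj =>
        if lj < cl then (PySem.Dict.mk sec).get? "index"  -- none = KeyError (outside Pre_)
        else fpiLoopA sections cl rest

def find_parent_index (sections : List (List (String × Int))) (i : Int) : Option Int :=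
  match PySem.List.pyGet? sections i with
  | none => none  -- IndexError (outside Pre_)
  | some sec =>
    match (PySem.Dict.mk sec).get? "level" with
    | none => none  -- KeyError (outside Pre_)
    | some cl =>
      if cl = 0 then none
      else fpiLoopA sections cl (PySem.List.pyRange (i - 1) (-1) (-1))

-- ===== PORT B =====
-- for j in range(i): lvl = sections[j].get("level"); if lvl is not None and lvl < cl:
--   parent = sections[j].get("index")   — ported as a foldl over range(0, i).
-- (sections[j] is pyGetD: for j in range(i) under Pre_ the index is always in range.)
def find_parent_index_alt (sections : List (List (String × Int))) (i : Int) : Option Int :=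
  match PySem.List.pyGet? sections i with
  | none => none  -- IndexError (outside Pre_)
  | some sec =>
    match (PySem.Dict.mk sec).get? "level" with
    | none => none  -- KeyError (outside Pre_)
    | some cl =>
      if cl = 0 then none
      else
        (PySem.List.pyRange 0 i 1).foldl (fun parent j =>
          match (PySem.Dict.mk (PySem.List.pyGetD sections j [])).get? "level" with
          | some l => if l < cl then (PySem.Dict.mk (PySem.List.pyGetD sections j [])).get? "index" else parent
          | none => parent) none

-- ===== PRECONDITION & SPEC =====
-- total views of sections[j]'s "level"/"index" fields
def fpiLvl (sections : List (List (String × Int))) (j : Int) : Option Int :=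
  (PySem.Dict.mk (PySem.List.pyGetD sections j [])).get? "level"
def fpiIdx (sections : List (List (String × Int))) (j : Int) : Option Int :=
  (PySem.Dict.mk (PySem.List.pyGetD sections j [])).get? "index"
-- section j has a "level" key whose value is ≥ cl (A's loop passes over it)
def fpiGE (sections : List (List (String × Int))) (cl : Int) (j : Nat) : Prop :=
  (fpiLvl sections j).isSome ∧ cl ≤ (fpiLvl sections j).getD 0
-- A's backward scan finishes without a KeyError: either every preceding section has a
-- level ≥ cl, or some preceding section has level < cl and "index", with only
-- levels ≥ cl strictly after it (A never reads anything before that section).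
def fpiScanOK (sections : List (List (String × Int))) (i : Int) (cl : Int) : Prop :=
  (∀ j < i.toNat, fpiGE sections cl j) ∨
  (∃ j < i.toNat, (fpiLvl sections j).isSome ∧ (fpiLvl sections j).getD 0 < cl ∧
    (fpiIdx sections j).isSome ∧ ∀ m < i.toNat, j < m → fpiGE sections cl m)
-- Pre_ excludes EXACTLY the inputs on which the Python A raises: IndexError at i,
-- KeyError for "level" at i, or (when that level is nonzero) a KeyError met during the
-- backward scan — a missing "level" before the first lower-level section is reached, or
-- a missing "index" on that section. A returns a value on every input admitted here.
def Pre_find_parent_index (sections : List (List (String × Int))) (i : Int) : Prop :=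
  PySem.Raise.InRange sections.length i ∧
  (fpiLvl sections i).isSome ∧
  ((fpiLvl sections i).getD 0 = 0 ∨ fpiScanOK sections i ((fpiLvl sections i).getD 0))
instance (sections : List (List (String × Int))) (i : Int) : Decidable (Pre_find_parent_index sections i) := by unfold Pre_find_parent_index fpiScanOK fpiGE; infer_instance

def pvWitness_find_parent_index : (List (List (String × Int))) × Int :=
  ([[("level", 0), ("index", 0)], [("level", 1), ("index", 1)], [("level", 2), ("index", 2)]], 2)

def Spec_find_parent_index (sections : List (List (String × Int))) (i : Int) (out : Option Int) : Prop := out = find_parent_index_alt sections i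
instance (sections : List (List (String × Int))) (i : Int) (out : Option Int) : Decidable (Spec_find_parent_index sections i out) := by unfold Spec_find_parent_index; infer_instance

-- ===== CLAIM (what is proved, stated in full; the proofs are below) =====
def Claim_equal_find_parent_index : Prop := ∀ (sections : List (List (String × Int))) (i : Int), Dom_find_parent_index sections i → Pre_find_parent_index sections i → Spec_find_parent_index sections i (find_parent_index sections i)

-- ===== LEMMAS AND PROOFS =====

-- "A's loop passes over index j": sections[j] exists and has a "level" ≥ cl
def fpiCont (sections : List (List (String × Int))) (cl : Int) (j : Int) : Prop :=
  ∃ sec lj, PySem.List.pyGet? sections j = some sec ∧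
    (PySem.Dict.mk sec).get? "level" = some lj ∧ cl ≤ lj

-- B's step function (the lambda of the foldl in find_parent_index_alt)
def fpiStepB (sections : List (List (String × Int))) (cl : Int) (parent : Option Int) (j : Int) : Option Int :=
  match (PySem.Dict.mk (PySem.List.pyGetD sections j [])).get? "level" with
  | some l => if l < cl then (PySem.Dict.mk (PySem.List.pyGetD sections j [])).get? "index" else parent
  | none => parent

lemma fpiLoopA_skip (sections : List (List (String × Int))) (cl : Int) (l rest : List Int)
    (h : ∀ j ∈ l, fpiCont sections cl j) :
    fpiLoopA sections cl (l ++ rest) = fpiLoopA sections cl rest := by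
  induction l with
  | nil => rfl
  | cons j t ih =>
    obtain ⟨sec, lj, hg, hl, hge⟩ := h j (by simp)
    have : ¬ lj < cl := by omega
    simp only [List.cons_append, fpiLoopA, hg, hl, if_neg this]
    exact ih (fun x hx => h x (by simp [hx]))

lemma fpiFoldB_skip (sections : List (List (String × Int))) (cl : Int) (l : List Int)
    (acc : Option Int) (h : ∀ j ∈ l, fpiCont sections cl j) :
    l.foldl (fpiStepB sections cl) acc = acc := by
  induction l generalizing acc with
  | nil => rfl
  | cons j t ih =>
    obtain ⟨sec, lj, hg, hl, hge⟩ := h j (by simp)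
    have hD : PySem.List.pyGetD sections j [] = sec := by
      simp [PySem.List.pyGetD, hg]
    have : ¬ lj < cl := by omega
    simp only [List.foldl_cons, fpiStepB, hD, hl, if_neg this]
    exact ih acc (fun x hx => h x (by simp [hx]))

lemma fpiCont_of_GE (sections : List (List (String × Int))) (cl : Int) (j : Int)
    (hj : 0 ≤ j) (hlen : j < (sections.length : Int))
    (hGE : fpiGE sections cl j.toNat) : fpiCont sections cl j := by
  obtain ⟨hs, hge⟩ := hGE
  have hjn : ((j.toNat : Int)) = j := Int.toNat_of_nonneg hj
  rw [hjn] at hs hge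
  obtain ⟨lj, hl⟩ := Option.isSome_iff_exists.mp hs
  have hg : PySem.List.pyGet? sections j = some (PySem.List.pyGetD sections j []) := by
    rw [PySem.List.pyGet?_eq_some_getElem sections hj hlen,
      PySem.List.pyGetD_eq_getElem sections [] hj hlen]
  refine ⟨PySem.List.pyGetD sections j [], lj, hg, hl, ?_⟩
  unfold fpiLvl at hl hge
  rw [hl] at hge
  simpa using hge

-- ===== VERDICT (by name: the statement is the Claim_ definition above) =====
theorem find_parent_index_spec : Claim_equal_find_parent_index := by
  intro sections i _ hpre
  obtain ⟨hin, hsome, hdisj⟩ := hpre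
  unfold Spec_find_parent_index find_parent_index find_parent_index_alt
  cases hg : PySem.List.pyGet? sections i with
  | none => rfl
  | some sec =>
    have hD : PySem.List.pyGetD sections i [] = sec := by
      simp [PySem.List.pyGetD, hg]
    have hlvl_eq : fpiLvl sections i = (PySem.Dict.mk sec).get? "level" := by
      unfold fpiLvl; rw [hD]
    rw [hlvl_eq] at hsome hdisj
    obtain ⟨cl, hl⟩ := Option.isSome_iff_exists.mp hsome
    rw [hl] at hdisj
    simp only [Option.getD_some] at hdisj
    by_cases h0 : cl = 0
    · simp [hl, h0]
    · simp only [hl, if_neg h0]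
      have hlen : ∀ j : Int, 0 ≤ j → j < i → j < (sections.length : Int) := by
        intro j _ hji
        unfold PySem.Raise.InRange at hin
        omega
      have hGEcont : ∀ (P : ∀ j < i.toNat, fpiGE sections cl j) (j : Int),
          0 ≤ j → j < i → fpiCont sections cl j := by
        intro P j hj hji
        exact fpiCont_of_GE sections cl j hj (hlen j hj hji)
          (P j.toNat (by omega))
      have hrev : PySem.List.pyRange (i - 1) (-1) (-1) = (PySem.List.pyRange 0 i 1).reverse := by
        have := PySem.List.pyRange_neg_one_eq_reverse (i - 1) (-1)
        simpa using this
      rcases hdisj with hdisj | hall | ⟨jN, hji, hsj, hlt, hix, hafter⟩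
      · exact absurd hdisj h0
      · -- no preceding lower-level section: both sides give none
        have hcont : ∀ j ∈ PySem.List.pyRange 0 i 1, fpiCont sections cl j := by
          intro j hj
          rw [PySem.List.mem_pyRange_one] at hj
          exact hGEcont hall j hj.1 hj.2
        rw [hrev]
        have hA : fpiLoopA sections cl ((PySem.List.pyRange 0 i 1).reverse ++ []) = fpiLoopA sections cl [] :=
          fpiLoopA_skip sections cl _ [] (fun j hj => hcont j (List.mem_reverse.mp hj))
        rw [List.append_nil] at hA
        rw [hA]
        exact (fpiFoldB_skip sections cl _ none hcont).symm
      · -- nearest preceding lower-level section is jN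
        have hj0 : (0:Int) ≤ (jN : Int) := Int.natCast_nonneg jN
        have hjNi : ((jN : Int)) < i := by omega
        have hjlen : ((jN : Int)) < (sections.length : Int) := hlen _ hj0 hjNi
        -- facts at jN
        have hgN : PySem.List.pyGet? sections (jN : Int) = some (PySem.List.pyGetD sections (jN : Int) []) := by
          rw [PySem.List.pyGet?_eq_some_getElem sections hj0 hjlen,
            PySem.List.pyGetD_eq_getElem sections [] hj0 hjlen]
        obtain ⟨lN, hlN⟩ := Option.isSome_iff_exists.mp hsj
        have hltN : lN < cl := by
          unfold fpiLvl at hlN hlt; rw [hlN] at hlt; simpa using hlt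
        -- split the forward range at jN
        have hsplit : PySem.List.pyRange 0 i 1 =
            PySem.List.pyRange 0 (jN : Int) 1 ++ (jN : Int) :: PySem.List.pyRange ((jN : Int) + 1) i 1 := by
          rw [PySem.List.pyRange_one_append 0 (jN : Int) i hj0 (by omega),
            PySem.List.pyRange_one_cons hjNi]
        have hcont2 : ∀ j ∈ PySem.List.pyRange ((jN : Int) + 1) i 1, fpiCont sections cl j := by
          intro j hj
          rw [PySem.List.mem_pyRange_one] at hj
          refine fpiCont_of_GE sections cl j (by omega) (hlen j (by omega) hj.2) ?_
          exact hafter j.toNat (by omega) (by omega)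
        -- B: the foldl ends at value fpiIdx sections jN
        have hstep : ∀ acc, fpiStepB sections cl acc (jN : Int) = fpiIdx sections (jN : Int) := by
          intro acc
          unfold fpiLvl at hlN
          simp only [fpiStepB, hlN, if_pos hltN, fpiIdx]
        have hB : (PySem.List.pyRange 0 i 1).foldl (fpiStepB sections cl) none = fpiIdx sections (jN : Int) := by
          rw [hsplit, List.foldl_append, List.foldl_cons, hstep,
            fpiFoldB_skip sections cl _ _ hcont2]
        -- A: the backward loop returns fpiIdx sections jN
        have hA : fpiLoopA sections cl (PySem.List.pyRange (i - 1) (-1) (-1)) = fpiIdx sections (jN : Int) := by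
          rw [hrev, hsplit]
          rw [List.reverse_append, List.reverse_cons, List.append_assoc]
          rw [fpiLoopA_skip sections cl _ _ (fun j hj => hcont2 j (List.mem_reverse.mp hj))]
          unfold fpiLvl at hlN
          simp only [List.singleton_append, fpiLoopA, hgN, hlN, if_pos hltN, fpiIdx]
        rw [hA]
        exact hB.symm
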